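-- pv_equiv track=rewrite | github.com/idealmundo/noodles | newLife.py | checkStatic
-- ===== SOURCE A (Python) =====
-- def checkStatic(staticList,testFactor,yOff=0,xOff=0):
--     newStat = []
--     yMin = 0-testFactor+yOff
--     yMax = testFactor+yOff
--     xMin = 0-testFactor+xOff
--     xMax = testFactor+xOff
--     for points in staticList:
--         tempPoints = []
--         for point in points:
--             if point[0] > yMin and point[0] < yMax and point[1] > xMin and point[1] < yMax:
--                 tempPoints.append(point)
--         newStat.append(tempPoints)
--     comp = newStat[0]
--     for step in [1,2,3,4,6]:
--         same = True
--         for l in range(step,len(newStat),step):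
--             if newStat[l]!=comp:
--                 same = False
--         if same:
--             return True
--     return False
-- ===== SOURCE B (Python) =====
-- def checkStatic(staticList, testFactor, yOff=0, xOff=0):
--     yMin = yOff - testFactor
--     yMax = yOff + testFactor
--     xMin = xOff - testFactor
--
--     def keep(p):
--         # note: the upper bound on p[1] is yMax, matching the original's behaviour
--         return yMin < p[0] < yMax and xMin < p[1] < yMax
--
--     comp = [p for p in staticList[0] if keep(p)]
--     bad = [i for i in range(1, len(staticList))
--            if [p for p in staticList[i] if keep(p)] != comp]
--     for step in (1, 2, 3, 4, 6):
--         if all(i % step != 0 for i in bad):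
--             return True
--     return False
-- ===== Notes on version B (the rewrite author's own statement) =====
-- stated objective: simpler
-- what changed: Instead of rescanning and re-comparing the whole filtered frame list for each candidate step, B filters each frame once, collects the indices that mismatch frame 0 in a single pass, and tests each step by a cheap divisibility check over that index list.
-- outside the precondition, e.g. on checkStatic([], 1, 0, 0): A raises IndexError, B raises IndexError
import Mathlib
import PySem

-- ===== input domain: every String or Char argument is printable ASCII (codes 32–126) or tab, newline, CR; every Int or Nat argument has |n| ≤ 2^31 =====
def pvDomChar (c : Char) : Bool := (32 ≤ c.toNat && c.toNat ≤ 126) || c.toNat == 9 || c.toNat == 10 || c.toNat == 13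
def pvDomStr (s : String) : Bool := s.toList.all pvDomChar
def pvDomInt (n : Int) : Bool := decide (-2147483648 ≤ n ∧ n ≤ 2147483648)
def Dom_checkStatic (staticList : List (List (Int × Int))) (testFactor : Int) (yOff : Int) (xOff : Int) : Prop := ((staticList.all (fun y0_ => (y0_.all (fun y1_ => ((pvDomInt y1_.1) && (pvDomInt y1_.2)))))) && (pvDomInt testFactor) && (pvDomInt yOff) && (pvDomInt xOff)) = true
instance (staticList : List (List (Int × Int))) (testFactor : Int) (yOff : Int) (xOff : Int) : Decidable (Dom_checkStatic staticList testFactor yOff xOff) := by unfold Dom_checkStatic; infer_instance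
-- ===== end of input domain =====

-- B replaces A's per-step rescan of the whole frame list by one mismatch-index pass
-- plus a divisibility test per step (objective: simpler; return value only, no mutation).

-- ===== PORT A =====
-- A's early-returning `for step in [1,2,3,4,6]` loop
def checkStaticStepLoop (newStat : List (List (Int × Int))) (comp : List (Int × Int)) : List Int → Bool
  | [] => false
  | step :: rest =>
    let same := (PySem.List.pyRange step (newStat.length : Int) step).foldl
      (fun same l => if PySem.List.pyGet? newStat l ≠ some comp then false else same) true
    if same then true else checkStaticStepLoop newStat comp rest

def checkStatic (staticList : List (List (Int × Int))) (testFactor : Int) (yOff : Int) (xOff : Int) : Bool :=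
  let yMin := 0 - testFactor + yOff
  let yMax := testFactor + yOff
  let xMin := 0 - testFactor + xOff
  let _xMax := testFactor + xOff  -- computed and never used, as in A
  let newStat := staticList.foldl (fun newStat points =>
    let tempPoints := points.foldl (fun tempPoints point =>
      if point.1 > yMin ∧ point.1 < yMax ∧ point.2 > xMin ∧ point.2 < yMax
      then tempPoints ++ [point] else tempPoints) []
    newStat ++ [tempPoints]) []
  match PySem.List.pyGet? newStat 0 with
  | none => false  -- Python raises IndexError here (empty staticList); excluded by Pre_
  | some comp => checkStaticStepLoop newStat comp [1, 2, 3, 4, 6]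

-- ===== PORT B =====
def checkStatic_alt (staticList : List (List (Int × Int))) (testFactor : Int) (yOff : Int) (xOff : Int) : Bool :=
  let yMin := yOff - testFactor
  let yMax := yOff + testFactor
  let xMin := xOff - testFactor
  let keep : Int × Int → Bool := fun p => decide (yMin < p.1 ∧ p.1 < yMax ∧ xMin < p.2 ∧ p.2 < yMax)
  match PySem.List.pyGet? staticList 0 with
  | none => false  -- Source B raises IndexError here too (empty staticList); excluded by Pre_
  | some first =>
    let comp := first.filter keep
    let bad := (PySem.List.pyRange 1 (staticList.length : Int) 1).filter
      (fun i => decide (¬ ((PySem.List.pyGetD staticList i []).filter keep = comp)))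
    [(1 : Int), 2, 3, 4, 6].any (fun step => bad.all (fun i => decide (PySem.Int.mod i step ≠ 0)))

-- ===== PRECONDITION & SPEC =====
-- Pre_ excludes only the empty staticList, on which both A and B raise IndexError (staticList[0]).
def Pre_checkStatic (staticList : List (List (Int × Int))) (testFactor : Int) (yOff : Int) (xOff : Int) : Prop :=
  staticList ≠ []
instance (staticList : List (List (Int × Int))) (testFactor : Int) (yOff : Int) (xOff : Int) : Decidable (Pre_checkStatic staticList testFactor yOff xOff) := by unfold Pre_checkStatic; infer_instance

def pvWitness_checkStatic : (List (List (Int × Int))) × Int × Int × Int := ([[(0, 0)], [(0, 0)]], 2, 0, 0)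

def Spec_checkStatic (staticList : List (List (Int × Int))) (testFactor : Int) (yOff : Int) (xOff : Int) (out : Bool) : Prop := out = checkStatic_alt staticList testFactor yOff xOff
instance (staticList : List (List (Int × Int))) (testFactor : Int) (yOff : Int) (xOff : Int) (out : Bool) : Decidable (Spec_checkStatic staticList testFactor yOff xOff out) := by unfold Spec_checkStatic; infer_instance

-- ===== CLAIM (what is proved, stated in full; the proofs are below) =====
def Claim_equal_checkStatic : Prop := ∀ (staticList : List (List (Int × Int))) (testFactor : Int) (yOff : Int) (xOff : Int), Dom_checkStatic staticList testFactor yOff xOff → Pre_checkStatic staticList testFactor yOff xOff → Spec_checkStatic staticList testFactor yOff xOff (checkStatic staticList testFactor yOff xOff)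

-- ===== LEMMAS AND PROOFS =====

-- A's boolean flag loop `same = True; for l in …: if P(l): same = False` is `all (¬P)`.
theorem foldl_flag {α : Type} (P : α → Prop) [DecidablePred P] (xs : List α) (b : Bool) :
    xs.foldl (fun same l => if P l then false else same) b
      = (b && xs.all fun l => decide ¬ P l) := by
  induction xs generalizing b with
  | nil => simp
  | cons a t ih =>
    simp only [List.foldl_cons, List.all_cons, ih]
    by_cases h : P a <;> simp [h]

-- The per-step check of A equals B's divisibility test over the mismatch indices.
theorem step_eq (xs : List (List (Int × Int))) (keep : (Int × Int) → Bool)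
    (comp : List (Int × Int)) (s : Int) (hs : 0 < s) :
    ((PySem.List.pyRange s ((xs.map (List.filter keep)).length : Int) s).foldl
        (fun same l => if PySem.List.pyGet? (xs.map (List.filter keep)) l ≠ some comp then false else same) true)
      = ((PySem.List.pyRange 1 (xs.length : Int) 1).filter
            (fun i => decide (¬ ((PySem.List.pyGetD xs i []).filter keep = comp)))).all
          (fun i => decide (PySem.Int.mod i s ≠ 0)) := by
  rw [foldl_flag]
  rw [Bool.eq_iff_iff]
  simp only [Bool.true_and, List.all_eq_true, List.mem_filter, decide_eq_true_eq,
    PySem.List.mem_pyRange_iff_of_pos hs, PySem.List.mem_pyRange_one, List.length_map,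
    not_not]
  constructor
  · rintro h i ⟨⟨h1, h2⟩, hmis⟩ hdvd
    have hdvd' : s ∣ i := (PySem.Int.mod_eq_zero_iff_dvd i s).mp hdvd
    have hsle : s ≤ i := Int.le_of_dvd (by omega) hdvd'
    have := h i ⟨hsle, h2, hdvd'.sub dvd_rfl⟩
    have hin : i.toNat < xs.length := by omega
    rw [PySem.List.pyGet?_eq_some_getElem _ (by omega) (by simpa using h2)] at this
    rw [PySem.List.pyGetD_eq_getElem _ _ (by omega) h2] at hmis
    simp only [List.getElem_map, Option.some.injEq] at this
    exact hmis this
  · rintro h l ⟨h1, h2, hdvd⟩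
    have hdl : s ∣ l := by simpa using hdvd.add (dvd_refl s)
    have h0 : (0 : Int) < l := by omega
    rw [PySem.List.pyGet?_eq_some_getElem _ (by omega) (by simpa using h2)]
    simp only [List.getElem_map, Option.some.injEq]
    by_contra hne
    have := h l ⟨⟨by omega, h2⟩, by
      rw [PySem.List.pyGetD_eq_getElem _ _ (by omega) h2]; exact hne⟩
    exact this ((PySem.Int.mod_eq_zero_iff_dvd l s).mpr hdl)

-- A's early-returning loop is `any` of the per-step flags.
theorem stepLoop_eq_any (newStat : List (List (Int × Int))) (comp : List (Int × Int))
    (steps : List Int) :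
    checkStaticStepLoop newStat comp steps
      = steps.any (fun step => (PySem.List.pyRange step (newStat.length : Int) step).foldl
          (fun same l => if PySem.List.pyGet? newStat l ≠ some comp then false else same) true) := by
  induction steps with
  | nil => simp [checkStaticStepLoop]
  | cons a t ih =>
    simp only [checkStaticStepLoop, List.any_cons, ih]
    by_cases h : (PySem.List.pyRange a (newStat.length : Int) a).foldl
        (fun same l => if PySem.List.pyGet? newStat l ≠ some comp then false else same) true <;>
      simp [h]


-- ===== VERDICT (by name: the statement is the Claim_ definition above) =====
theorem checkStatic_spec : Claim_equal_checkStatic := by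
  intro staticList testFactor yOff xOff _ hPre
  unfold Spec_checkStatic
  obtain ⟨p, rest, rfl⟩ := List.exists_cons_of_ne_nil hPre
  simp only [checkStatic, checkStatic_alt]
  have hpred : (fun point : Int × Int =>
        decide (point.1 > 0 - testFactor + yOff ∧ point.1 < testFactor + yOff ∧
          point.2 > 0 - testFactor + xOff ∧ point.2 < testFactor + yOff))
      = (fun p : Int × Int => decide (yOff - testFactor < p.1 ∧ p.1 < yOff + testFactor ∧
          xOff - testFactor < p.2 ∧ p.2 < yOff + testFactor)) := by
    funext q
    simp only [decide_eq_decide]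
    omega
  simp only [PySem.List.foldl_append_ite_eq_filter, PySem.List.foldl_append_singleton_eq_map]
  rw [hpred]
  simp only [List.nil_append, List.map_cons, PySem.List.pyGet?_zero_cons]
  rw [stepLoop_eq_any, ← List.map_cons]
  simp only [List.any_cons, List.any_nil]
  rw [step_eq _ _ _ 1 (by norm_num), step_eq _ _ _ 2 (by norm_num), step_eq _ _ _ 3 (by norm_num),
    step_eq _ _ _ 4 (by norm_num), step_eq _ _ _ 6 (by norm_num)]
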